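-- pv_equiv track=rewrite | github.com/MACS-30121-25F/TT_solutions | tt6_recursion/soln/recursion.py | is_apparently_increasing
-- ===== SOURCE A (Python) =====
-- def is_apparently_increasing(l):
--   if (len(l) <= 1):
--     return True
--   else:
--     if (l[1] == -1):
--       new_l = [l[0]]
--       new_l.extend(l[2:])
--       return is_apparently_increasing(new_l)
--     elif (l[0] < l[1]):
--       return is_apparently_increasing(l[1:])
--     else:
--       return False
-- ===== SOURCE B (Python) =====
-- def is_apparently_increasing(l):
--     it = iter(l)
--     for cur in it:
--         break
--     else:
--         return True
--     for x in it:
--         if x == -1: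
--             continue
--         if cur >= x:
--             return False
--         cur = x
--     return True
-- ===== Notes on version B (the rewrite author's own statement) =====
-- stated objective: alternative
-- what changed: Replaced the recursive list-slicing-and-rebuilding with a single iterative pass tracking the last non-wildcard value and skipping interior -1 entries.
import Mathlib
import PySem

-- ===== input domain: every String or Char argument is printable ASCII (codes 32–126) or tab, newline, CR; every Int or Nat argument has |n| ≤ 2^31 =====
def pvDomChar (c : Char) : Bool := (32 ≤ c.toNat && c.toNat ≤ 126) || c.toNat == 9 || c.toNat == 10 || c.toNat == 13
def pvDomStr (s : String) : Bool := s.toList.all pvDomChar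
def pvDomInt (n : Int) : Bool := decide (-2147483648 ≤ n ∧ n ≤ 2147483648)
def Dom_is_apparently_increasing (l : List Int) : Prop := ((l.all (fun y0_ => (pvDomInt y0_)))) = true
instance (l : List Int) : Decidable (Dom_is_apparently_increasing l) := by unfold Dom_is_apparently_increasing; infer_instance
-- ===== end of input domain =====

-- B replaces A's recursive slicing with one iterative pass over the list, skipping interior -1 wildcards.


-- ===== PORT A =====
-- Literal port of A: len ≤ 1 → True; l[1] == -1 → recurse on [l[0]] + l[2:]; l[0] < l[1] → recurse on l[1:]; else False.
def is_apparently_increasing : List Int → Bool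
  | [] => true
  | [_] => true
  | a :: b :: rest =>
    if b == -1 then is_apparently_increasing (a :: rest)
    else if a < b then is_apparently_increasing (b :: rest)
    else false
termination_by l => l.length

-- ===== PORT B =====
-- Port of B's loop: `cur` is the running value, `xs` the remaining elements of l[1:].
def pvAltGo (cur : Int) : List Int → Bool
  | [] => true
  | x :: xs =>
    if x == -1 then pvAltGo cur xs
    else if cur ≥ x then false
    else pvAltGo x xs

def is_apparently_increasing_alt (l : List Int) : Bool :=
  match l with
  | [] => true
  | c :: xs => pvAltGo c xs

-- ===== PRECONDITION & SPEC =====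
def Spec_is_apparently_increasing (l : List Int) (out : Bool) : Prop := out = is_apparently_increasing_alt l
instance (l : List Int) (out : Bool) : Decidable (Spec_is_apparently_increasing l out) := by unfold Spec_is_apparently_increasing; infer_instance

-- ===== CLAIM (what is proved, stated in full; the proofs are below) =====
def Claim_equal_is_apparently_increasing : Prop := ∀ (l : List Int), Dom_is_apparently_increasing l → Spec_is_apparently_increasing l (is_apparently_increasing l)

-- ===== LEMMAS AND PROOFS =====
theorem is_apparently_increasing_cons (l : List Int) :
    ∀ a : Int, is_apparently_increasing (a :: l) = pvAltGo a l := by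
  induction l with
  | nil => intro a; simp [is_apparently_increasing, pvAltGo]
  | cons b rest ih =>
    intro a
    by_cases hb : b = -1
    · simp [is_apparently_increasing, pvAltGo, hb, ih]
    · by_cases hab : a < b
      · have h2 : ¬ a ≥ b := by omega
        simp [is_apparently_increasing, pvAltGo, hb, hab, h2, ih]
      · have h2 : a ≥ b := by omega
        simp [is_apparently_increasing, pvAltGo, hb, hab, h2]

-- ===== VERDICT (by name: the statement is the Claim_ definition above) =====
theorem is_apparently_increasing_spec : Claim_equal_is_apparently_increasing := by
  intro l _
  unfold Spec_is_apparently_increasing is_apparently_increasing_alt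
  cases l with
  | nil => simp [is_apparently_increasing]
  | cons a xs => exact is_apparently_increasing_cons xs a
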